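-- pv_equiv track=rewrite | github.com/AP-MI-2021/lab-3-camelia-leuca | main.py | concatenare_cifre_ordine_crescatoare
-- ===== SOURCE A (Python) =====
-- def concatenare_cifre_ordine_crescatoare(lst):
--     """
--     Verifica daca concatenarea elementelor din lista are cifrele in ordine crescatoare
--     :param lst: o lista de numere intregi
--     :return: True daca oridinea cifrelor este crescatoare sau False in caz contrar
--     """
--     ultima_cifra = 10
--     for i in reversed(range(len(lst))):
--         copie = lst[i]
--         while copie:
--             if copie % 10 > ultima_cifra:
--                 return False
--             else:
--                 ultima_cifra = copie % 10
--             copie = copie // 10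
--     return True
-- ===== SOURCE B (Python) =====
-- def concatenare_cifre_ordine_crescatoare(lst):
--     """
--     Verifica daca concatenarea elementelor din lista are cifrele in ordine crescatoare
--     :param lst: o lista de numere intregi
--     :return: True daca oridinea cifrelor este crescatoare sau False in caz contrar
--     """
--     if any(x < 0 for x in lst):
--         # a minus sign in the concatenation: the digits cannot be in increasing order
--         return False
--     digits = []
--     for x in lst:
--         ds = []
--         while x:
--             ds.append(x % 10)
--             x //= 10
--         digits.extend(reversed(ds))
--     return digits == sorted(digits)
-- ===== Notes on version B (the rewrite author's own statement) =====
-- stated objective: alternative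
-- what changed: A fuses digit extraction and the monotonicity check into one early-returning reverse scan carrying the last digit seen; B rejects negative elements up front and otherwise builds the full digit list in concatenation order, deciding the answer by comparing it with its sorted copy.
-- outside the precondition, e.g. on concatenare_cifre_ordine_crescatoare([-1, 5]): A returns False, B returns False
import Mathlib
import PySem

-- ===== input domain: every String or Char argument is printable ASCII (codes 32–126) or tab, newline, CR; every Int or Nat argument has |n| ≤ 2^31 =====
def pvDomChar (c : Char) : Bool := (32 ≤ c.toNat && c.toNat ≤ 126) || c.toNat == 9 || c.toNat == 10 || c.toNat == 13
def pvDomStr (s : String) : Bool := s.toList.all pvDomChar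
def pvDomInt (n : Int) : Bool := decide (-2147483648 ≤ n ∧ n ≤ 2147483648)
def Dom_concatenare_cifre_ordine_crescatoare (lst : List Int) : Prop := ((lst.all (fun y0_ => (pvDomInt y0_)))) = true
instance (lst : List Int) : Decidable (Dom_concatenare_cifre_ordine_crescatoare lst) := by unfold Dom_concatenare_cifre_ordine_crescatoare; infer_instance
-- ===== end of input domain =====

-- B rejects negative elements up front (a minus sign breaks the digit order) and otherwise
-- builds the whole digit list in concatenation order and compares it with its sorted copy,
-- instead of A's fused early-returning reverse digit scan; an alternative decomposition.

-- ===== PORT A =====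
-- Python's 'while copie:' peels digits with % and //.  For copie = -1 Python repeats
-- 'copie = -1 // 10 = -1' forever: it returns False right away if 9 > ultima and
-- otherwise never terminates; the 'some ultima' answer of that branch is a stand-in for
-- the divergence, which Pre_ keeps out of the claim.  All other inputs are exact.
def pvAWhile (copie ultima : Int) : Option Int :=
  if _h0 : copie = 0 then some ultima
  else if _h1 : copie = -1 then (if (9:Int) > ultima then none else some ultima)
  else if PySem.Int.mod copie 10 > ultima then none
  else pvAWhile (PySem.Int.floordiv copie 10) (PySem.Int.mod copie 10)
termination_by copie.natAbs
decreasing_by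
  rw [PySem.Int.floordiv_eq_ediv_of_pos (by omega : (0:Int) < 10)]
  omega

-- 'for i in reversed(range(len(lst)))' over lst, i.e. a walk over lst.reverse
def pvALoop : List Int → Int → Bool
  | [], _ => true
  | x :: xs, u =>
    match pvAWhile x u with
    | none => false
    | some u' => pvALoop xs u'

def concatenare_cifre_ordine_crescatoare (lst : List Int) : Bool :=
  pvALoop lst.reverse 10

-- ===== PORT B =====
-- 'ds' of Source B: the digits of x least-significant first; Source B only runs this loop on
-- non-negative x (the guard below fired otherwise), where 'x ≤ 0' is Python's 'not x'.
def pvDigitsLSB (x : Int) : List Int :=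
  if _h : x ≤ 0 then []
  else PySem.Int.mod x 10 :: pvDigitsLSB (PySem.Int.floordiv x 10)
termination_by x.toNat
decreasing_by
  rw [PySem.Int.floordiv_eq_ediv_of_pos (by omega : (0:Int) < 10)]
  omega

def concatenare_cifre_ordine_crescatoare_alt (lst : List Int) : Bool :=
  if lst.any (fun x => decide (x < 0)) then false
  else
    let digits := lst.foldl (fun acc x => acc ++ (pvDigitsLSB x).reverse) []
    decide (digits = PySem.List.sorted digits (fun d => d) false)

-- ===== PRECONDITION & SPEC =====
-- Pre_ excludes lists containing -1: there Python A's 'copie = copie // 10' loop sticks at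
-- -1 and runs forever unless it has already answered False, so A diverges on some of these
-- lists (e.g. [-1], [5, -1]); the closed-form cover also drops some lists where A still
-- returns False (e.g. [-1, 5], where B returns False as well).
def Pre_concatenare_cifre_ordine_crescatoare (lst : List Int) : Prop :=
  (-1 : Int) ∉ lst
instance (lst : List Int) : Decidable (Pre_concatenare_cifre_ordine_crescatoare lst) := by
  unfold Pre_concatenare_cifre_ordine_crescatoare; infer_instance

def pvWitness_concatenare_cifre_ordine_crescatoare : List Int := [1, 23, 2]

def Spec_concatenare_cifre_ordine_crescatoare (lst : List Int) (out : Bool) : Prop := out = concatenare_cifre_ordine_crescatoare_alt lst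
instance (lst : List Int) (out : Bool) : Decidable (Spec_concatenare_cifre_ordine_crescatoare lst out) := by unfold Spec_concatenare_cifre_ordine_crescatoare; infer_instance

-- ===== CLAIM (what is proved, stated in full; the proofs are below) =====
def Claim_equal_concatenare_cifre_ordine_crescatoare : Prop := ∀ (lst : List Int), Dom_concatenare_cifre_ordine_crescatoare lst → Pre_concatenare_cifre_ordine_crescatoare lst → Spec_concatenare_cifre_ordine_crescatoare lst (concatenare_cifre_ordine_crescatoare lst)

-- ===== LEMMAS AND PROOFS =====

-- the inner while loop of A, phrased as a scan over an already-extracted digit list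
def pvScan : List Int → Int → Option Int
  | [], u => some u
  | d :: ds, u => if d > u then none else pvScan ds d

theorem pvAWhile_eq_scan (copie ultima : Int) :
    0 ≤ copie → pvAWhile copie ultima = pvScan (pvDigitsLSB copie) ultima := by
  fun_induction pvAWhile copie ultima with
  | case1 u =>
    intro _
    rw [pvDigitsLSB]
    simp [pvScan]
  | case2 u h9 h0 => intro h; exact absurd h (by norm_num)
  | case3 u h9 h0 => intro h; exact absurd h (by norm_num)
  | case4 c u h0 h1 hgt =>
    intro hc
    rw [pvDigitsLSB]
    simp only [dif_neg (by omega : ¬ c ≤ 0), pvScan, if_pos hgt]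
  | case5 c u h0 h1 hgt ih =>
    intro hc
    rw [pvDigitsLSB]
    simp only [dif_neg (by omega : ¬ c ≤ 0), pvScan, if_neg hgt]
    refine ih ?_
    rw [PySem.Int.floordiv_eq_ediv_of_pos (by omega : (0:Int) < 10)]
    omega

-- on a negative number other than -1, A's digit loop always answers False
theorem pvAWhile_neg (copie ultima : Int) :
    copie < 0 → copie ≠ -1 → pvAWhile copie ultima = none := by
  fun_induction pvAWhile copie ultima with
  | case1 u => intro hc _; exact absurd hc (by norm_num)
  | case2 u h9 h0 => intro _ _; rfl
  | case3 u h9 h0 => intro _ hne; exact absurd rfl hne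
  | case4 c u h0 h1 hgt => intro _ _; rfl
  | case5 c u h0 h1 hgt ih =>
    intro hc hne
    have hdiv : PySem.Int.floordiv c 10 = c / 10 :=
      PySem.Int.floordiv_eq_ediv_of_pos (by omega)
    by_cases hc1 : PySem.Int.floordiv c 10 = -1
    · have hmul := PySem.Int.floordiv_mul_add_mod c 10
      rw [pvAWhile.eq_def]
      simp only [dif_neg (show ¬ PySem.Int.floordiv c 10 = 0 by omega), dif_pos hc1]
      rw [if_pos (by omega : (9:Int) > PySem.Int.mod c 10)]
    · exact ih (by omega) hc1

-- a list with a negative element (none equal to -1) makes A's loop answer False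
theorem pvALoop_neg (L : List Int) (u : Int) :
    (∀ x ∈ L, x ≠ -1) → (∃ x ∈ L, x < 0) → pvALoop L u = false := by
  induction L generalizing u with
  | nil => rintro _ ⟨x, hx, -⟩; cases hx
  | cons x xs ih =>
    rintro hne ⟨y, hy, hylt⟩
    rw [pvALoop]
    cases h : pvAWhile x u with
    | none => rfl
    | some u' =>
      rcases List.mem_cons.mp hy with rfl | hy'
      · rw [pvAWhile_neg y u hylt (hne y hy)] at h; cases h
      · exact ih u' (fun z hz => hne z (List.mem_cons_of_mem x hz)) ⟨y, hy', hylt⟩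

theorem pvScan_append (a b : List Int) (u : Int) :
    pvScan (a ++ b) u = (pvScan a u).bind (fun u' => pvScan b u') := by
  induction a generalizing u with
  | nil => simp [pvScan]
  | cons d ds ih => by_cases h : d > u <;> simp [pvScan, h, ih]

theorem pvALoop_eq_scan (L : List Int) (u : Int) :
    (∀ x ∈ L, 0 ≤ x) → pvALoop L u = (pvScan (L.flatMap pvDigitsLSB) u).isSome := by
  induction L generalizing u with
  | nil => intro _; simp [pvALoop, pvScan]
  | cons x xs ih =>
    intro hpos
    rw [pvALoop, pvAWhile_eq_scan x u (hpos x List.mem_cons_self), List.flatMap_cons,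
      pvScan_append]
    cases h : pvScan (pvDigitsLSB x) u with
    | none => simp
    | some u' => simp [ih u' (fun z hz => hpos z (List.mem_cons_of_mem x hz))]

theorem pvScan_isSome_iff (R : List Int) (u : Int) :
    (pvScan R u).isSome = true ↔ List.IsChain (fun a b => b ≤ a) (u :: R) := by
  induction R generalizing u with
  | nil => simp [pvScan]
  | cons d ds ih =>
    by_cases h : d > u
    · simp only [pvScan, if_pos h, Option.isSome_none, Bool.false_eq_true, false_iff,
        List.isChain_cons_cons]
      rintro ⟨h1, -⟩
      omega
    · simp only [pvScan, if_neg h, ih, List.isChain_cons_cons, iff_and_self]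
      intro
      omega

theorem pvDigitsLSB_lt_ten (x : Int) : ∀ d ∈ pvDigitsLSB x, d < 10 := by
  fun_induction pvDigitsLSB x with
  | case1 c h => simp
  | case2 c h ih =>
    intro d hd
    rcases List.mem_cons.mp hd with rfl | hd
    · exact PySem.Int.mod_lt _ (by omega)
    · exact ih d hd

-- A's answer on a list of non-negatives: the reversed digit list is non-increasing
theorem portA_iff (lst : List Int) (hpos : ∀ x ∈ lst, 0 ≤ x) :
    concatenare_cifre_ordine_crescatoare lst = true
      ↔ List.IsChain (fun a b : Int => b ≤ a) (lst.reverse.flatMap pvDigitsLSB) := by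
  rw [concatenare_cifre_ordine_crescatoare,
    pvALoop_eq_scan _ _ (fun x hx => hpos x (List.mem_reverse.mp hx)), pvScan_isSome_iff]
  rcases hR : lst.reverse.flatMap pvDigitsLSB with _ | ⟨d, ds⟩
  · simp
  · have hd : d < 10 := by
      have hmem : d ∈ lst.reverse.flatMap pvDigitsLSB := by
        rw [hR]; exact List.mem_cons_self
      rcases List.mem_flatMap.mp hmem with ⟨x, _, hx⟩
      exact pvDigitsLSB_lt_ten x d hx
    rw [List.isChain_cons_cons]
    constructor
    · rintro ⟨-, h⟩; exact h
    · intro h; exact ⟨by omega, h⟩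

theorem pvFold_eq_flatMap (L : List Int) (acc : List Int) :
    L.foldl (fun acc x => acc ++ (pvDigitsLSB x).reverse) acc
      = acc ++ L.flatMap (fun x => (pvDigitsLSB x).reverse) := by
  induction L generalizing acc with
  | nil => simp
  | cons x xs ih => simp [List.foldl_cons, ih, List.flatMap_cons]

-- B's answer on a list of non-negatives: the concatenated digit list is non-decreasing
theorem portB_iff (lst : List Int) (hpos : ∀ x ∈ lst, 0 ≤ x) :
    concatenare_cifre_ordine_crescatoare_alt lst = true
      ↔ List.IsChain (fun a b : Int => a ≤ b)
          (lst.flatMap (fun x => (pvDigitsLSB x).reverse)) := by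
  rw [concatenare_cifre_ordine_crescatoare_alt]
  have hguard : lst.any (fun x => decide (x < 0)) = false := by
    simp only [List.any_eq_false, decide_eq_true_eq]
    exact fun x hx => not_lt.mpr (hpos x hx)
  rw [hguard]
  simp only [Bool.false_eq_true, if_false]
  simp only [pvFold_eq_flatMap lst [], List.nil_append, decide_eq_true_eq]
  set D := lst.flatMap (fun x => (pvDigitsLSB x).reverse) with hD
  constructor
  · intro h
    have hp := PySem.List.sorted_pairwise (xs := D) (key := fun d => d)
    rw [← h] at hp
    exact List.isChain_iff_pairwise.mpr hp
  · intro h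
    have hp : D.Pairwise (fun a b : Int => a ≤ b) := List.isChain_iff_pairwise.mp h
    exact (PySem.List.sorted_eq_self_of_pairwise D (fun d : Int => d) hp).symm

theorem digits_reverse (lst : List Int) :
    (lst.flatMap (fun x => (pvDigitsLSB x).reverse)).reverse
      = lst.reverse.flatMap pvDigitsLSB := by
  induction lst with
  | nil => simp
  | cons x xs ih => simp [List.flatMap_cons, ih]

-- ===== VERDICT (by name: the statement is the Claim_ definition above) =====
theorem concatenare_cifre_ordine_crescatoare_spec : Claim_equal_concatenare_cifre_ordine_crescatoare := by
  intro lst _ hpre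
  unfold Spec_concatenare_cifre_ordine_crescatoare
  by_cases hpos : ∀ x ∈ lst, 0 ≤ x
  · rw [Bool.eq_iff_iff, portA_iff lst hpos, portB_iff lst hpos, ← digits_reverse,
      List.isChain_reverse]
  · push Not at hpos
    rcases hpos with ⟨y, hy, hylt⟩
    have hne : ∀ x ∈ lst, x ≠ -1 := fun x hx hx1 => hpre (hx1 ▸ hx)
    rw [concatenare_cifre_ordine_crescatoare,
      pvALoop_neg _ _ (fun x hx => hne x (List.mem_reverse.mp hx))
        ⟨y, List.mem_reverse.mpr hy, hylt⟩,
      concatenare_cifre_ordine_crescatoare_alt,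
      if_pos (List.any_eq_true.mpr ⟨y, hy, by simpa using hylt⟩)]
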